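-- pv_equiv track=rewrite | github.com/Al1z4y/Bookie-Exchange | backend/app/routes/forums.py | detect_abuse
-- ===== SOURCE A (Python) =====
-- def detect_abuse(content: str) -> bool:
--     """
--     Simple abuse detection (can be enhanced with ML/AI).
--     Checks for common abusive patterns.
--     """
--     abuse_keywords = [
--         "spam", "scam", "fake",  # Add more as needed
--     ]
--
--     content_lower = content.lower()
--     # Check for excessive repetition (spam detection)
--     words = content_lower.split()
--     if len(words) > 0:
--         word_counts = {}
--         for word in words:
--             word_counts[word] = word_counts.get(word, 0) + 1
--             if word_counts[word] > 10:  # Same word repeated more than 10 times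
--                 return True
--
--     # Check for abuse keywords (simple check)
--     # In production, use more sophisticated NLP/AI models
--     for keyword in abuse_keywords:
--         if keyword in content_lower and content_lower.count(keyword) > 3:
--             return True
--
--     return False
-- ===== SOURCE B (Python) =====
-- def detect_abuse(content: str) -> bool:
--     """Sort-then-scan re-implementation: sort the words so equal words are
--     adjacent, then one linear scan for a run longer than 10; keyword stage
--     as a single any() over the keywords."""
--     content_lower = content.lower()
--     run, prev = 0, None
--     for w in sorted(content_lower.split()):
--         run = run + 1 if w == prev else 1
--         if run > 10:
--             return True
--         prev = w
--     return any(k in content_lower and content_lower.count(k) > 3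
--                for k in ("spam", "scam", "fake"))
-- ===== Notes on version B (the rewrite author's own statement) =====
-- stated objective: alternative
-- what changed: Replaces A's hash-map counting loop (dict of running counts with an in-loop early return) by sorting the words and scanning once for a run of the same word longer than 10, and collapses the keyword loop to a single any().
import Mathlib
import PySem

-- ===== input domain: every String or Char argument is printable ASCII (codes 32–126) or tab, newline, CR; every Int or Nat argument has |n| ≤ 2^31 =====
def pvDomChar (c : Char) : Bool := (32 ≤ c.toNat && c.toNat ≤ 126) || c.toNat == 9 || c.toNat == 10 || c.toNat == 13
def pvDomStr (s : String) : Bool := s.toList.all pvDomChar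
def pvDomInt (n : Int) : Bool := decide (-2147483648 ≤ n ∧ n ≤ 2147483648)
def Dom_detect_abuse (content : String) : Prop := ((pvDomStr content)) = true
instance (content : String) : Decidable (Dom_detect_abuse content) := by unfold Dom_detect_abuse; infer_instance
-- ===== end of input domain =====

-- B replaces A's dict-counting loop by sorting the words and scanning once for a
-- run of the same word longer than 10; the keyword loop becomes a single any().

-- ===== PORT A =====
-- A's word-counting loop with its in-loop early return
def daLoop : List String → PySem.Dict String Int → Bool
  | [], _ => false
  | w :: ws, d =>
    let c := d.getD w 0 + 1
    let d' := d.insert w c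
    if c > 10 then true else daLoop ws d'

-- A's keyword loop with its early return
def daKey (cl : String) : List String → Bool
  | [] => false
  | k :: ks =>
    if PySem.Str.isIn k cl && decide (PySem.Str.count cl k > 3) then true else daKey cl ks

def detect_abuse (content : String) : Bool :=
  let abuse_keywords := ["spam", "scam", "fake"]
  let content_lower := PySem.Str.lower content
  let words := PySem.Str.split₀ content_lower
  let rep := if words.length > 0 then daLoop words PySem.Dict.empty else false
  if rep then true else daKey content_lower abuse_keywords

-- ===== PORT B =====
-- B's single scan of the sorted word list: run length of the current word, previous word
def runScan : List String → Option String → Nat → Bool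
  | [], _, _ => false
  | w :: ws, prev, run =>
    let run' := if some w = prev then run + 1 else 1
    if run' > 10 then true else runScan ws (some w) run'

def detect_abuse_alt (content : String) : Bool :=
  let content_lower := PySem.Str.lower content
  if runScan (PySem.List.sorted (PySem.Str.split₀ content_lower) (fun x => x) false) none 0
  then true
  else ["spam", "scam", "fake"].any
    (fun k => PySem.Str.isIn k content_lower && decide (PySem.Str.count content_lower k > 3))

-- ===== PRECONDITION & SPEC =====
def Spec_detect_abuse (content : String) (out : Bool) : Prop := out = detect_abuse_alt content
instance (content : String) (out : Bool) : Decidable (Spec_detect_abuse content out) := by unfold Spec_detect_abuse; infer_instance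

-- ===== CLAIM (what is proved, stated in full; the proofs are below) =====
def Claim_equal_detect_abuse : Prop := ∀ (content : String), Dom_detect_abuse content → Spec_detect_abuse content (detect_abuse content)

-- ===== LEMMAS AND PROOFS =====

-- A's early-exit counting loop fires iff some word's final tally (seeded by d) exceeds 10
lemma daLoop_eq (ws : List String) (d : PySem.Dict String Int) :
    daLoop ws d = decide (∃ w ∈ ws, d.getD w 0 + (ws.count w : Int) > 10) := by
  induction ws generalizing d with
  | nil => simp [daLoop]
  | cons w ws ih =>
    simp only [daLoop]
    by_cases h : d.getD w 0 + 1 > 10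
    · rw [if_pos h, eq_comm, decide_eq_true_eq]
      exact ⟨w, List.mem_cons_self, by rw [List.count_cons_self]; push_cast; omega⟩
    · simp only [if_neg h]
      rw [ih]
      apply decide_eq_decide.mpr
      constructor
      · rintro ⟨x, hx, hgt⟩
        by_cases hxw : x = w
        · subst hxw
          rw [PySem.Dict.getD_insert_self] at hgt
          refine ⟨x, List.mem_cons_self, ?_⟩
          have : (x :: ws).count x = ws.count x + 1 := by simp [List.count_cons_self]
          rw [this]; push_cast at hgt ⊢; omega
        · rw [PySem.Dict.getD_insert_of_ne d _ _ hxw] at hgt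
          refine ⟨x, List.mem_cons_of_mem _ hx, ?_⟩
          have : (w :: ws).count x = ws.count x := by
            simp [Ne.symm hxw]
          rw [this]; exact hgt
      · rintro ⟨x, hx, hgt⟩
        rcases List.mem_cons.mp hx with hxw | hxs
        · subst hxw
          have hc : (x :: ws).count x = ws.count x + 1 := by simp [List.count_cons_self]
          rw [hc] at hgt
          have hmem : x ∈ ws := by
            by_contra hnot
            have : ws.count x = 0 := List.count_eq_zero.mpr hnot
            rw [this] at hgt; push_cast at hgt; omega
          refine ⟨x, hmem, ?_⟩
          rw [PySem.Dict.getD_insert_self]; push_cast at hgt ⊢; omega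
        · by_cases hxw : x = w
          · subst hxw
            have hc : (x :: ws).count x = ws.count x + 1 := by simp [List.count_cons_self]
            rw [hc] at hgt
            refine ⟨x, hxs, ?_⟩
            rw [PySem.Dict.getD_insert_self]; push_cast at hgt ⊢; omega
          · refine ⟨x, hxs, ?_⟩
            rw [PySem.Dict.getD_insert_of_ne d _ _ hxw]
            have : (w :: ws).count x = ws.count x := by
              simp [Ne.symm hxw]
            rw [this] at hgt; exact hgt

-- A's early-exit keyword loop is an any()
lemma daKey_eq (cl : String) (ks : List String) :
    daKey cl ks
      = ks.any (fun k => PySem.Str.isIn k cl && decide (PySem.Str.count cl k > 3)) := by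
  induction ks with
  | nil => simp [daKey]
  | cons k ks ih =>
    simp only [daKey, List.any_cons, ih]
    by_cases h : (PySem.Str.isIn k cl && decide (PySem.Str.count cl k > 3)) = true
    · simp
    · simp

-- B's run scan on a sorted list detects exactly 'some word occurs more than 10 times'
lemma runScan_sorted (l : List String) : ∀ (prev : Option String) (run : Nat),
    l.Pairwise (· ≤ ·) →
    (∀ p, prev = some p → ∀ x ∈ l, p ≤ x) →
    run ≤ 10 →
    runScan l prev run
      = decide ((∃ p, prev = some p ∧ run + l.count p > 10) ∨
                ∃ w ∈ l, some w ≠ prev ∧ l.count w > 10) := by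
  induction l with
  | nil =>
    intro prev run hp hprev hrun
    simp only [runScan]
    symm
    rw [decide_eq_false_iff_not]
    rintro (⟨p, _, hgt⟩ | ⟨w, hw, _⟩)
    · simp only [List.count_nil] at hgt; omega
    · exact absurd hw List.not_mem_nil
  | cons w ws ih =>
    intro prev run hp hprev hrun
    have hpw : ∀ x ∈ ws, w ≤ x := fun x hx => (List.pairwise_cons.mp hp).1 x hx
    have hpws : ws.Pairwise (· ≤ ·) := (List.pairwise_cons.mp hp).2
    by_cases hw : some w = prev
    · -- same word as previous: extend the run
      subst hw
      simp only [runScan, if_pos]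
      by_cases hgt : run + 1 > 10
      · simp only [if_pos hgt]
        rw [eq_comm, decide_eq_true_eq]
        refine Or.inl ⟨w, rfl, ?_⟩
        rw [List.count_cons_self]
        omega
      · simp only [if_neg hgt]
        rw [ih (some w) (run + 1) hpws
          (by rintro p hp' x hx; exact (Option.some.inj hp') ▸ hpw x hx) (by omega)]
        apply decide_eq_decide.mpr
        constructor
        · rintro (⟨p, hp', hc⟩ | ⟨v, hv, hne, hc⟩)
          · obtain rfl := Option.some.inj hp'
            refine Or.inl ⟨w, rfl, ?_⟩
            rw [List.count_cons_self]; omega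
          · have hvw : v ≠ w := by simpa using hne
            refine Or.inr ⟨v, List.mem_cons_of_mem _ hv, hne, ?_⟩
            rw [List.count_cons_of_ne (Ne.symm hvw)]; exact hc
        · rintro (⟨p, hp', hc⟩ | ⟨v, hv, hne, hc⟩)
          · obtain rfl := Option.some.inj hp'
            rw [List.count_cons_self] at hc
            exact Or.inl ⟨w, rfl, by omega⟩
          · have hvw : v ≠ w := by simpa using hne
            have hv' : v ∈ ws := by
              rcases List.mem_cons.mp hv with h | h
              · exact absurd h hvw
              · exact h
            rw [List.count_cons_of_ne (Ne.symm hvw)] at hc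
            exact Or.inr ⟨v, hv', hne, hc⟩
    · -- new word: restart the run at 1
      simp only [runScan, if_neg hw]
      have h1 : ¬ ((1:Nat) > 10) := by omega
      simp only [if_neg h1]
      rw [ih (some w) 1 hpws
        (by rintro p hp' x hx; exact (Option.some.inj hp') ▸ hpw x hx) (by omega)]
      -- prev's word (if any) does not occur in w :: ws
      have hprev0 : ∀ p, prev = some p → (w :: ws).count p = 0 := by
        intro p hp'
        apply List.count_eq_zero.mpr
        intro hmem
        have hle : p ≤ w := hprev p hp' w List.mem_cons_self
        rcases List.mem_cons.mp hmem with h | h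
        · exact hw (by rw [h] at hp'; rw [hp'])
        · have hge : w ≤ p := hpw p h
          have hpe : p = w := le_antisymm hle hge
          exact hw (by rw [hpe] at hp'; rw [hp'])
      apply decide_eq_decide.mpr
      constructor
      · rintro (⟨p, hp', hc⟩ | ⟨v, hv, hne, hc⟩)
        · obtain rfl := Option.some.inj hp'
          refine Or.inr ⟨w, List.mem_cons_self, hw, ?_⟩
          rw [List.count_cons_self]; omega
        · by_cases hvw : v = w
          · subst hvw
            refine Or.inr ⟨v, List.mem_cons_self, hw, ?_⟩
            rw [List.count_cons_self]; omega
          · refine Or.inr ⟨v, List.mem_cons_of_mem _ hv, ?_, ?_⟩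
            · intro hvp
              have h0 : (w :: ws).count v = 0 := hprev0 v hvp.symm
              have hpos : 0 < (w :: ws).count v :=
                List.count_pos_iff.mpr (List.mem_cons_of_mem _ hv)
              omega
            · rw [List.count_cons_of_ne (Ne.symm hvw)]; exact hc
      · rintro (⟨p, hp', hc⟩ | ⟨v, hv, hne, hc⟩)
        · have h0 : (w :: ws).count p = 0 := hprev0 p hp'
          omega
        · by_cases hvw : v = w
          · subst hvw
            rw [List.count_cons_self] at hc
            exact Or.inl ⟨v, rfl, by omega⟩
          · have hv' : v ∈ ws := by
              rcases List.mem_cons.mp hv with h | h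
              · exact absurd h hvw
              · exact h
            rw [List.count_cons_of_ne (Ne.symm hvw)] at hc
            exact Or.inr ⟨v, hv', by simpa using hvw, hc⟩

-- both repetition stages decide 'some word occurs more than 10 times'
lemma rep_stages_eq (ws : List String) :
    (if ws.length > 0 then daLoop ws PySem.Dict.empty else false)
      = runScan (PySem.List.sorted ws (fun x => x) false) none 0 := by
  have hB : runScan (PySem.List.sorted ws (fun x => x) false) none 0
      = decide (∃ w ∈ ws, ws.count w > 10) := by
    have hperm : (PySem.List.sorted ws (fun x => x) false).Perm ws :=
      PySem.List.sorted_perm ws _ _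
    rw [runScan_sorted _ none 0
      (by simpa using PySem.List.sorted_pairwise ws (fun x => x))
      (by rintro p ⟨⟩) (by omega)]
    apply decide_eq_decide.mpr
    constructor
    · rintro (⟨p, hp, _⟩ | ⟨w, hw, _, hc⟩)
      · cases hp
      · exact ⟨w, hperm.mem_iff.mp hw, by rw [← hperm.count_eq]; exact hc⟩
    · rintro ⟨w, hw, hc⟩
      exact Or.inr ⟨w, hperm.mem_iff.mpr hw, by simp, by rw [hperm.count_eq]; exact hc⟩
  have hA : daLoop ws PySem.Dict.empty = decide (∃ w ∈ ws, ws.count w > 10) := by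
    rw [daLoop_eq]
    apply decide_eq_decide.mpr
    constructor
    · rintro ⟨w, hw, hgt⟩
      refine ⟨w, hw, ?_⟩
      rw [PySem.Dict.getD_empty] at hgt; omega
    · rintro ⟨w, hw, hgt⟩
      refine ⟨w, hw, ?_⟩
      rw [PySem.Dict.getD_empty]; omega
  cases ws with
  | nil => simp [runScan, PySem.List.sorted]
  | cons x xs =>
    simp only [List.length_cons, if_pos (Nat.succ_pos _)]
    rw [hA, hB]

-- ===== VERDICT (by name: the statement is the Claim_ definition above) =====
theorem detect_abuse_spec : Claim_equal_detect_abuse := by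
  intro content _
  unfold Spec_detect_abuse detect_abuse detect_abuse_alt
  simp only []
  rw [rep_stages_eq, daKey_eq]
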